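-- pv_equiv track=rewrite | github.com/shri-talari/python-learning-repo | Functions/function1.py | list_operations
-- ===== SOURCE A (Python) =====
-- def list_operations(numbers):
--     if not numbers:
--         return (None, None, 0, set())
--
--     total = 0
--     smallest = numbers[0]
--     largest = numbers[0]
--     unique_evens = set()
--
--     for num in numbers:
--         total += num
--         if num < smallest:
--             smallest = num
--         if num > largest:
--             largest = num
--         if num % 2 == 0:
--             unique_evens.add(num)
--
--     return (largest, smallest, total, unique_evens)
-- ===== SOURCE B (Python) =====
-- def list_operations(numbers):
--     if not numbers:
--         return (None, None, 0, set())
--     largest = max(numbers)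
--     smallest = min(numbers)
--     total = sum(numbers)
--     unique_evens = {n for n in numbers if n % 2 == 0}
--     return (largest, smallest, total, unique_evens)
-- ===== Notes on version B (the rewrite author's own statement) =====
-- stated objective: idiomatic
-- what changed: A's single fused accumulation loop over one 4-part state is replaced by four independent builtin scans (max, min, sum, set comprehension).
import Mathlib
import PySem

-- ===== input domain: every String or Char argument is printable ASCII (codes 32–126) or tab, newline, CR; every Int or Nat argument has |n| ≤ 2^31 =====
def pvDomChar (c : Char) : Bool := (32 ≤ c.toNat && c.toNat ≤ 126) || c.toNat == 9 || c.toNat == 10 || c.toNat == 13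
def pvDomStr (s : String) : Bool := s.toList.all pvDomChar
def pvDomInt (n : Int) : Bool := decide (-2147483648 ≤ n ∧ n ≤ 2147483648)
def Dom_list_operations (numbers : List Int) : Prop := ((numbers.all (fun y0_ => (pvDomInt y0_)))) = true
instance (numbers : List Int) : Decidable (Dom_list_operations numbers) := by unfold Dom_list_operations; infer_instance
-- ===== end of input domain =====

-- ===== PORT A =====
-- B computes the same tuple with four independent scans (max/min/sum/set comprehension)
-- instead of A's single fused loop; same cost, more idiomatic.
def list_operations (numbers : List Int) : Option Int × Option Int × Int × List Int :=
  match numbers with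
  | [] => (none, none, 0, PySem.Set.empty)
  | h :: _ =>
    let st := numbers.foldl
      (fun (s : Int × Int × Int × PySem.Set Int) num =>
        let total := s.1 + num
        let smallest := if num < s.2.1 then num else s.2.1
        let largest := if num > s.2.2.1 then num else s.2.2.1
        let evens := if PySem.Int.mod num 2 == 0 then PySem.Set.add s.2.2.2 num else s.2.2.2
        (total, smallest, largest, evens))
      (0, h, h, PySem.Set.empty)
    (some st.2.2.1, some st.2.1, st.1, st.2.2.2)

-- ===== PORT B =====
def list_operations_alt (numbers : List Int) : Option Int × Option Int × Int × List Int :=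
  match numbers with
  | [] => (none, none, 0, PySem.Set.empty)
  | _ :: _ =>
    (PySem.List.max? numbers (fun x => x),
     PySem.List.min? numbers (fun x => x),
     numbers.sum,
     PySem.Set.ofList (numbers.filter (fun n => PySem.Int.mod n 2 == 0)))

-- ===== PRECONDITION & SPEC =====
def Spec_list_operations (numbers : List Int) (out : Option Int × Option Int × Int × List Int) : Prop := out = list_operations_alt numbers
instance (numbers : List Int) (out : Option Int × Option Int × Int × List Int) : Decidable (Spec_list_operations numbers out) := by unfold Spec_list_operations; infer_instance

-- ===== CLAIM (what is proved, stated in full; the proofs are below) =====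
def Claim_equal_list_operations : Prop := ∀ (numbers : List Int), Dom_list_operations numbers → Spec_list_operations numbers (list_operations numbers)

-- ===== LEMMAS AND PROOFS =====

-- ===== VERDICT (by name: the statement is the Claim_ definition above) =====
-- the fused loop computes the four independent aggregates
theorem fused_foldl (xs : List Int) (t s l : Int) (e : PySem.Set Int) :
    xs.foldl
      (fun (st : Int × Int × Int × PySem.Set Int) num =>
        let total := st.1 + num
        let smallest := if num < st.2.1 then num else st.2.1
        let largest := if num > st.2.2.1 then num else st.2.2.1
        let evens := if PySem.Int.mod num 2 == 0 then PySem.Set.add st.2.2.2 num else st.2.2.2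
        (total, smallest, largest, evens)) (t, s, l, e)
    = (t + xs.sum, xs.foldl min s, xs.foldl max l,
       (xs.filter (fun n => PySem.Int.mod n 2 == 0)).foldl PySem.Set.add e) := by
  induction xs generalizing t s l e with
  | nil => simp
  | cons x xs ih =>
    have hmin : (if x < s then x else s) = min s x := by rw [min_def]; split <;> split <;> omega
    have hmax : (if x > l then x else l) = max l x := by rw [max_def]; split <;> split <;> omega
    cases hmod : PySem.Int.mod x 2 == 0 <;>
      simp only [List.foldl_cons, List.filter_cons, hmod, Bool.false_eq_true, if_false,
        eq_self_iff_true, if_true, hmin, hmax, ih, List.sum_cons, add_assoc]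

theorem list_operations_spec : Claim_equal_list_operations := by
  intro numbers _
  unfold Spec_list_operations list_operations list_operations_alt
  match numbers with
  | [] => rfl
  | h :: t =>
    dsimp only
    rw [fused_foldl]
    simp only [PySem.List.max?_id_cons, PySem.List.min?_id_cons, PySem.Set.ofList_eq_foldl,
      List.foldl_cons, max_self, min_self, zero_add]
    rfl
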